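-- pv_equiv track=rewrite | github.com/EricCharnesky/CIS1501-Fall2023 | MidtermReview/main.py | prime_factorial_plus_odds_minus_evens
-- ===== SOURCE A (Python) =====
-- def is_prime(n):
--     """
--     Returns True if n is a prime number, False otherwise.
--     """
--     if n < 2:  # 0 and 1 are not primes
--         return False
--     if n == 2:
--         return True
--     if n % 2 == 0:
--         return False
--     for i in range(3, int(n**0.5) + 1, 2):
--         if n % i == 0:
--             return False
--     return True
--
-- def prime_factorial_plus_odds_minus_evens(n):
--     total = 1
--     for number in range(2, n+1):
--         if is_prime(number):
--             total *= number
--         if number % 2: # odd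
--             total += number
--         else:
--             total -= number
--     return total
-- ===== SOURCE B (Python) =====
-- def prime_factorial_plus_odds_minus_evens(n):
--     # sieve: mark every m = i*j (2 <= i <= j) up to n as composite, then one O(n) pass
--     size = n + 1 if n >= 2 else 0
--     composite = [False] * size
--     i = 2
--     while i * i <= n:
--         for m in range(i * i, n + 1, i):
--             composite[m] = True
--         i += 1
--     total = 1
--     for number in range(2, n + 1):
--         if not composite[number]:
--             total *= number
--         if number % 2:
--             total += number
--         else:
--             total -= number
--     return total
-- ===== Notes on version B (the rewrite author's own statement) =====
-- stated objective: alternative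
-- what changed: Replaces A's per-number trial-division primality test (is_prime on every number in 2..n) with one sieve pass that marks every product i*j (2 <= i <= j) up to n as composite, then runs the same accumulation loop reading the sieve; the big-integer accumulation dominates the run time, so this is not measurably faster.
import Mathlib
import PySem

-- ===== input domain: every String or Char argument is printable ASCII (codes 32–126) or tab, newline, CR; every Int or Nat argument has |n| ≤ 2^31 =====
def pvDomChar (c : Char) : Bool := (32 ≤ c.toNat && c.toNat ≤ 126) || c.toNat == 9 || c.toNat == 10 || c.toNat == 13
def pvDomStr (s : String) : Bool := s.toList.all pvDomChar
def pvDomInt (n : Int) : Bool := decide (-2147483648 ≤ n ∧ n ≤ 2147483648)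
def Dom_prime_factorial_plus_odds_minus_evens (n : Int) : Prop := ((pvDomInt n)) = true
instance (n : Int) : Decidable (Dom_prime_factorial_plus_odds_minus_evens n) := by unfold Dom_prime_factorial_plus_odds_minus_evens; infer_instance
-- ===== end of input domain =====

-- B replaces A's per-number trial-division primality test by a single sieve pass
-- (mark every product i*j, 2 ≤ i ≤ j, up to n as composite), then runs the same
-- accumulation loop reading the sieve (an alternative algorithm, not measurably faster:
-- the big-integer accumulation dominates).

-- ===== PORT A =====
-- is_prime from Source A.  `int(n**0.5)` is ported as Nat.sqrt: for 0 ≤ n ≤ 2^31 the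
-- float expression int(n**0.5) equals the integer square root exactly.
def pvIsPrime (n : Int) : Bool :=
  if n < 2 then false
  else if n = 2 then true
  else if PySem.Int.mod n 2 = 0 then false
  else (PySem.List.pyRange 3 ((n.toNat.sqrt : Int) + 1) 2).all
         (fun i => !(PySem.Int.mod n i == 0))

def prime_factorial_plus_odds_minus_evens (n : Int) : Int :=
  (PySem.List.pyRange 2 (n + 1) 1).foldl
    (fun total number =>
      let total := if pvIsPrime number then total * number else total
      if PySem.Int.mod number 2 != 0 then total + number else total - number) 1

-- ===== PORT B =====
-- inner `for m in range(i*i, n+1, i): composite[m] = True` of Source B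
def pvMarkMultiples (c : List Bool) (i n : Int) : List Bool :=
  (PySem.List.pyRange (i * i) (n + 1) i).foldl
    (fun c m => PySem.List.pySetD c m true) c

-- `while i*i <= n:` loop of Source B
def pvSieve (c : List Bool) (i n : Int) : List Bool :=
  if h : i * i ≤ n then pvSieve (pvMarkMultiples c i n) (i + 1) n else c
termination_by (n + 1 - i).toNat
decreasing_by
  have hi : i ≤ n := by nlinarith [sq_nonneg i, sq_nonneg (i - 1)]
  omega

def prime_factorial_plus_odds_minus_evens_alt (n : Int) : Int :=
  let size : Int := if 2 ≤ n then n + 1 else 0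
  let composite := pvSieve (List.replicate size.toNat false) 2 n
  (PySem.List.pyRange 2 (n + 1) 1).foldl
    (fun total number =>
      let total := if !(PySem.List.pyGetD composite number false) then total * number else total
      if PySem.Int.mod number 2 != 0 then total + number else total - number) 1

-- ===== PRECONDITION & SPEC =====
def Spec_prime_factorial_plus_odds_minus_evens (n : Int) (out : Int) : Prop := out = prime_factorial_plus_odds_minus_evens_alt n
instance (n : Int) (out : Int) : Decidable (Spec_prime_factorial_plus_odds_minus_evens n out) := by unfold Spec_prime_factorial_plus_odds_minus_evens; infer_instance

-- ===== CLAIM (what is proved, stated in full; the proofs are below) =====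
def Claim_equal_prime_factorial_plus_odds_minus_evens : Prop := ∀ (n : Int), Dom_prime_factorial_plus_odds_minus_evens n → Spec_prime_factorial_plus_odds_minus_evens n (prime_factorial_plus_odds_minus_evens n)

-- ===== LEMMAS AND PROOFS =====

theorem pv_mark_list_length (ms : List Int) (c : List Bool) :
    (ms.foldl (fun c m => PySem.List.pySetD c m true) c).length = c.length := by
  induction ms generalizing c with
  | nil => rfl
  | cons m ms ih => simp [List.foldl_cons, ih, PySem.List.length_pySetD]

theorem pv_mark_list_getD (ms : List Int) (c : List Bool)
    (h : ∀ m ∈ ms, 0 ≤ m ∧ m < (c.length : Int)) (k : Nat) (hk : k < c.length) :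
    (ms.foldl (fun c m => PySem.List.pySetD c m true) c).getD k false
      = (decide ((k : Int) ∈ ms) || c.getD k false) := by
  induction ms generalizing c with
  | nil => simp
  | cons m ms ih =>
    obtain ⟨hm0, hm1⟩ := h m (List.mem_cons_self ..)
    rw [List.foldl_cons, ih _ (fun x hx => by
        have := h x (List.mem_cons_of_mem _ hx)
        rwa [PySem.List.length_pySetD])
      (by rwa [PySem.List.length_pySetD])]
    rw [PySem.List.pySetD_of_nonneg (h := hm0)]
    by_cases hmk : (k : Int) = m
    · have ht : m.toNat = k := by omega
      simp [List.getD_eq_getElem?_getD, ht, hk, hmk]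
    · have ht : m.toNat ≠ k := by omega
      simp [List.getD_eq_getElem?_getD, ht, hmk]


theorem pv_markMultiples_length (c : List Bool) (i n : Int) :
    (pvMarkMultiples c i n).length = c.length := pv_mark_list_length _ _

theorem pv_sieve_length (c : List Bool) (i n : Int) :
    (pvSieve c i n).length = c.length := by
  fun_induction pvSieve with
  | case1 c i h ih => rw [ih, pv_markMultiples_length]
  | case2 => rfl

theorem pv_markMultiples_getD (c : List Bool) (i n : Int) (hi : 2 ≤ i)
    (hlen : (c.length : Int) = n + 1) (k : Nat) (hk : k < c.length) :
    ((pvMarkMultiples c i n).getD k false = true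
      ↔ (i * i ≤ (k : Int) ∧ i ∣ (k : Int)) ∨ c.getD k false = true) := by
  have h0 : (0:Int) < i := by omega
  rw [pvMarkMultiples, pv_mark_list_getD _ _ (fun m hm => by
      rw [PySem.List.mem_pyRange_iff_of_pos h0] at hm
      refine ⟨by nlinarith [hm.1], by omega⟩) k hk]
  simp only [Bool.or_eq_true, decide_eq_true_eq, PySem.List.mem_pyRange_iff_of_pos h0]
  have hii : i ∣ ((k : Int) - i * i) ↔ i ∣ (k : Int) := by
    constructor
    · intro h; have := dvd_add h (Dvd.intro i rfl); simpa using this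
    · intro h; exact dvd_sub h (Dvd.intro i rfl)
  constructor
  · rintro (⟨h1, h2, h3⟩ | h)
    · exact Or.inl ⟨h1, hii.mp h3⟩
    · exact Or.inr h
  · rintro (⟨h1, h2⟩ | h)
    · exact Or.inl ⟨h1, by omega, hii.mpr h2⟩
    · exact Or.inr h

theorem pv_sieve_getD (c : List Bool) (i n : Int) (hi : 2 ≤ i)
    (hlen : (c.length : Int) = n + 1) (k : Nat) (hk : k < c.length) :
    ((pvSieve c i n).getD k false = true
      ↔ (∃ j : Int, i ≤ j ∧ j * j ≤ (k : Int) ∧ j ∣ (k : Int)) ∨ c.getD k false = true) := by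
  fun_induction pvSieve with
  | case1 c i h ih =>
    rw [ih (by omega) (by rw [pv_markMultiples_length]; exact hlen)
        (by rwa [pv_markMultiples_length]),
      pv_markMultiples_getD c i n hi hlen k hk]
    constructor
    · rintro (⟨j, hj1, hj2, hj3⟩ | ⟨hd1, hd2⟩ | hc)
      · exact Or.inl ⟨j, by omega, hj2, hj3⟩
      · exact Or.inl ⟨i, le_refl i, hd1, hd2⟩
      · exact Or.inr hc
    · rintro (⟨j, hj1, hj2, hj3⟩ | hc)
      · rcases eq_or_lt_of_le hj1 with rfl | hlt
        · exact Or.inr (Or.inl ⟨hj2, hj3⟩)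
        · exact Or.inl ⟨j, by omega, hj2, hj3⟩
      · exact Or.inr (Or.inr hc)
  | case2 c i h =>
    constructor
    · exact Or.inr
    · rintro (⟨j, hj1, hj2, hj3⟩ | hc)
      · exfalso
        have hkn : (k : Int) ≤ n := by omega
        nlinarith
      · exact hc

theorem pv_divisor_iff_not_prime (k : Nat) (hk : 2 ≤ k) :
    (∃ j : Int, 2 ≤ j ∧ j * j ≤ (k : Int) ∧ j ∣ (k : Int)) ↔ ¬ k.Prime := by
  constructor
  · rintro ⟨j, hj1, hj2, hj3⟩ hp
    have hjn : j.toNat ∣ k := by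
      have : (j.toNat : Int) ∣ (k : Int) := by rwa [Int.toNat_of_nonneg (by omega)]
      exact_mod_cast this
    rcases (Nat.Prime.eq_one_or_self_of_dvd hp _ hjn) with h1 | h1
    · omega
    · have hjk : j = (k : Int) := by omega
      rw [hjk] at hj2
      have h2k : (2 : Int) ≤ (k : Int) := by exact_mod_cast hk
      nlinarith
  · intro hp
    refine ⟨(k.minFac : Int), ?_, ?_, ?_⟩
    · exact_mod_cast (Nat.minFac_prime (by omega)).two_le
    · have := Nat.minFac_sq_le_self (by omega) hp
      have : k.minFac * k.minFac ≤ k := by nlinarith [this]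
      exact_mod_cast this
    · exact_mod_cast Nat.minFac_dvd k


theorem pv_isPrime_iff (k : Int) (hk : 2 ≤ k) : pvIsPrime k = true ↔ k.toNat.Prime := by
  have hcast : ((k.toNat : Int)) = k := Int.toNat_of_nonneg (by omega)
  unfold pvIsPrime
  rw [if_neg (by omega)]
  by_cases h2 : k = 2
  · subst h2
    decide
  · rw [if_neg h2]
    have h3 : 3 ≤ k := by omega
    by_cases he : PySem.Int.mod k 2 = 0
    · rw [if_pos he]
      have hdvd : (2 : Nat) ∣ k.toNat := by
        have h2d : (2 : Int) ∣ k := (PySem.Int.mod_eq_zero_iff_dvd k 2).mp he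
        rw [← hcast] at h2d
        exact_mod_cast h2d
      simp only [Bool.false_eq_true, false_iff]
      intro hp
      rcases hp.eq_one_or_self_of_dvd 2 hdvd with h | h <;> omega
    · rw [if_neg he]
      have hodd : ¬ (2 : Int) ∣ k := fun hd => he ((PySem.Int.mod_eq_zero_iff_dvd k 2).mpr hd)
      rw [List.all_eq_true]
      constructor
      · intro hall
        rw [Nat.prime_def_le_sqrt]
        refine ⟨by omega, fun m hm2 hmsq hmdvd => ?_⟩
        have hmodd : ¬ (2 : Nat) ∣ m := by
          intro h2m
          apply hodd
          rw [← hcast]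
          exact_mod_cast h2m.trans hmdvd
        have hm3 : 3 ≤ m := by omega
        have hmem : ((m : Nat) : Int) ∈ PySem.List.pyRange 3 ((k.toNat.sqrt : Int) + 1) 2 := by
          rw [PySem.List.mem_pyRange_iff_of_pos (by norm_num)]
          refine ⟨by exact_mod_cast hm3, by omega, ?_⟩
          refine Int.dvd_of_emod_eq_zero ?_
          omega
        have := hall _ hmem
        simp only [Bool.not_eq_eq_eq_not, Bool.not_true, beq_eq_false_iff_ne, ne_eq] at this
        apply this
        rw [PySem.Int.mod_eq_zero_iff_dvd, ← hcast]
        exact_mod_cast hmdvd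
      · intro hp x hx
        rw [PySem.List.mem_pyRange_iff_of_pos (by norm_num)] at hx
        obtain ⟨hx3, hxlt, _⟩ := hx
        simp only [Bool.not_eq_eq_eq_not, Bool.not_true, beq_eq_false_iff_ne, ne_eq]
        intro hmod0
        have hxdvd : x.toNat ∣ k.toNat := by
          have : x ∣ k := (PySem.Int.mod_eq_zero_iff_dvd k x).mp hmod0
          rw [← hcast, ← Int.toNat_of_nonneg (show (0:Int) ≤ x by omega)] at this
          exact_mod_cast this
        rw [Nat.prime_def_le_sqrt] at hp
        exact hp.2 x.toNat (by omega) (by omega) hxdvd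

theorem pv_main_eq (n : Int) :
    prime_factorial_plus_odds_minus_evens n = prime_factorial_plus_odds_minus_evens_alt n := by
  unfold prime_factorial_plus_odds_minus_evens prime_factorial_plus_odds_minus_evens_alt
  by_cases hn : 2 ≤ n
  · simp only [if_pos hn]
    refine PySem.List.foldl_congr_mem _ _ _ _ ?_
    intro acc x hx
    rw [PySem.List.mem_pyRange_one] at hx
    have hxk : (x.toNat : Int) = x := Int.toNat_of_nonneg (by omega)
    have hlen : (pvSieve (List.replicate (n + 1).toNat false) 2 n).length = (n + 1).toNat := by
      rw [pv_sieve_length, List.length_replicate]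
    have hkl : x.toNat < (pvSieve (List.replicate (n + 1).toNat false) 2 n).length := by
      rw [hlen]; omega
    have hget : PySem.List.pyGetD (pvSieve (List.replicate (n + 1).toNat false) 2 n) x false
        = (pvSieve (List.replicate (n + 1).toNat false) 2 n).getD x.toNat false := by
      rw [PySem.List.pyGetD_eq_getElem _ _ (by omega) (by rw [hlen]; omega),
        List.getD_eq_getElem _ _ hkl]
    have h2 : PySem.List.pyGetD (pvSieve (List.replicate (n + 1).toNat false) 2 n) x false = true
        ↔ ¬ x.toNat.Prime := by
      rw [hget, pv_sieve_getD (List.replicate (n + 1).toNat false) 2 n (le_refl 2)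
        (by rw [List.length_replicate]; omega) x.toNat (by rw [List.length_replicate]; omega)]
      rw [hxk]
      have hrep : (List.replicate (n + 1).toNat false).getD x.toNat false = false := by
        simp only [List.getD_eq_getElem?_getD, List.getElem?_replicate]
        split <;> rfl
      rw [hrep]
      simp only [Bool.false_eq_true, or_false]
      have := pv_divisor_iff_not_prime x.toNat (by omega)
      rw [hxk] at this
      exact this
    have h1 : pvIsPrime x = true ↔ x.toNat.Prime := pv_isPrime_iff x hx.1
    have key : pvIsPrime x = !(PySem.List.pyGetD (pvSieve (List.replicate (n + 1).toNat false) 2 n) x false) := by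
      rcases Bool.dichotomy (PySem.List.pyGetD (pvSieve (List.replicate (n + 1).toNat false) 2 n) x false) with hb | hb <;>
        rw [hb] at h2 ⊢
      · simp only [Bool.false_eq_true, false_iff, not_not] at h2
        simp [h1.mpr h2]
      · simp only [true_iff] at h2
        simp only [Bool.not_true]
        rcases Bool.dichotomy (pvIsPrime x) with hp | hp
        · exact hp
        · exact absurd (h1.mp hp) h2
    rw [key]
  · have hnil : PySem.List.pyRange 2 (n + 1) 1 = [] := PySem.List.pyRange_one_eq_nil (by omega)
    simp only [if_neg hn, hnil, List.foldl_nil]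

-- ===== VERDICT (by name: the statement is the Claim_ definition above) =====
theorem prime_factorial_plus_odds_minus_evens_spec : Claim_equal_prime_factorial_plus_odds_minus_evens := by
  intro n _
  unfold Spec_prime_factorial_plus_odds_minus_evens
  exact pv_main_eq n
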